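-- pv_equiv track=rewrite | github.com/IvayloValkov/Python_Fundamentals | Functions/10_array_manipulator.py | first_even_elements
-- ===== SOURCE A (Python) =====
-- def first_even_elements(array, count):
--     even_only = list(filter(lambda el: el % 2 == 0, array))
--     first_elements_array = []
--     for i in range(len(even_only)):
--         if count == 0:
--             break
--         first_elements_array.append(even_only[i])
--         count -= 1
--
--     return first_elements_array
-- ===== SOURCE B (Python) =====
-- def first_even_elements(array, count):
--     result = []
--     remaining = count
--     for el in array:
--         if el % 2 == 0:
--             if remaining == 0:
--                 break
--             result.append(el)
--             remaining -= 1
--     return result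
-- ===== Notes on version B (the rewrite author's own statement) =====
-- stated objective: simpler
-- what changed: Fuses A's filter pass plus index-based take loop into one early-exiting traversal of the array with a remaining counter; no intermediate filtered list is built.
import Mathlib
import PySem

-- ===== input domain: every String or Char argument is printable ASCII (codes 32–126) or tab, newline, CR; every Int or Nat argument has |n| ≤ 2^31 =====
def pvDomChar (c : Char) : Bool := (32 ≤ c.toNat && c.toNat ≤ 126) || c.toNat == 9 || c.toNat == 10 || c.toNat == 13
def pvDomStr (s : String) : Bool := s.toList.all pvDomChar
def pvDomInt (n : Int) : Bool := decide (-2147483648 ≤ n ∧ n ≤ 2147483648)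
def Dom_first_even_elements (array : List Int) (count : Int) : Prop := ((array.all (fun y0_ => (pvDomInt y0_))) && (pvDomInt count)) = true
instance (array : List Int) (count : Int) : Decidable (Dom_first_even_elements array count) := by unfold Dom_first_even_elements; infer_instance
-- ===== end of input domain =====

-- B fuses A's filter pass and its index-based take loop into one early-exiting traversal (same return value; simpler decomposition).


-- ===== PORT A =====
-- the 'for i in range(len(even_only))' loop with its break, as recursion on the index list;
-- even_only[i] is in range for every i the loop reaches, so pyGetD is exact here
def pvLoopA (even_only : List Int) : List Int → Int → List Int → List Int
  | [], _, acc => acc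
  | i :: rest, count, acc =>
    if count = 0 then acc
    else pvLoopA even_only rest (count - 1) (acc ++ [PySem.List.pyGetD even_only i 0])

def first_even_elements (array : List Int) (count : Int) : List Int :=
  let even_only := array.filter (fun el => PySem.Int.mod el 2 = 0)
  pvLoopA even_only (PySem.List.pyRange 0 even_only.length 1) count []

-- ===== PORT B =====
-- B's single loop over the array with the 'remaining' counter and the break
def pvGoB : List Int → Int → List Int
  | [], _ => []
  | el :: rest, remaining =>
    if PySem.Int.mod el 2 = 0 then
      if remaining = 0 then []
      else el :: pvGoB rest (remaining - 1)
    else pvGoB rest remaining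

def first_even_elements_alt (array : List Int) (count : Int) : List Int :=
  pvGoB array count

-- ===== PRECONDITION & SPEC =====
def Spec_first_even_elements (array : List Int) (count : Int) (out : List Int) : Prop := out = first_even_elements_alt array count
instance (array : List Int) (count : Int) (out : List Int) : Decidable (Spec_first_even_elements array count out) := by unfold Spec_first_even_elements; infer_instance

-- ===== CLAIM (what is proved, stated in full; the proofs are below) =====
def Claim_equal_first_even_elements : Prop := ∀ (array : List Int) (count : Int), Dom_first_even_elements array count → Spec_first_even_elements array count (first_even_elements array count)

-- ===== LEMMAS AND PROOFS =====

-- reference "take count" on a list, shared target of both ports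
def pvTakeC : List Int → Int → List Int
  | [], _ => []
  | x :: r, c => if c = 0 then [] else x :: pvTakeC r (c - 1)

theorem pvLoopA_acc (l : List Int) (idxs : List Int) (c : Int) (acc : List Int) :
    pvLoopA l idxs c acc = acc ++ pvLoopA l idxs c [] := by
  induction idxs generalizing c acc with
  | nil => simp [pvLoopA]
  | cons i rest ih =>
    by_cases h : c = 0
    · simp [pvLoopA, h]
    · rw [pvLoopA, pvLoopA, if_neg h, if_neg h, ih (c - 1) (acc ++ _), ih (c - 1) ([] ++ _)]
      simp

theorem pvLoopA_range (suf pre : List Int) (c : Int) :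
    pvLoopA (pre ++ suf) (PySem.List.pyRange (pre.length) ((pre ++ suf).length) 1) c [] = pvTakeC suf c := by
  induction suf generalizing pre c with
  | nil => simp [PySem.List.pyRange_one_eq_nil, pvLoopA, pvTakeC]
  | cons x r ih =>
    have hlt : (pre.length : Int) < ((pre ++ x :: r).length : Int) := by
      simp
    rw [PySem.List.pyRange_one_cons hlt, pvLoopA]
    by_cases h : c = 0
    · simp [h, pvTakeC]
    · rw [if_neg h, pvLoopA_acc]
      have hget : PySem.List.pyGetD (pre ++ x :: r) (pre.length : Int) 0 = x := by
        simp [PySem.List.pyGetD]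
      have hre : pre ++ x :: r = (pre ++ [x]) ++ r := by simp
      have hlen : (pre.length : Int) + 1 = ((pre ++ [x]).length : Int) := by simp
      rw [hget, hre, hlen, ih (pre ++ [x]) (c - 1)]
      simp [pvTakeC, h]

theorem pvGoB_eq_takeC (array : List Int) (c : Int) :
    pvGoB array c = pvTakeC (array.filter (fun el => PySem.Int.mod el 2 = 0)) c := by
  induction array generalizing c with
  | nil => simp [pvGoB, pvTakeC]
  | cons x r ih =>
    by_cases hx : PySem.Int.mod x 2 = 0
    · rw [pvGoB, if_pos hx, List.filter_cons_of_pos (by simpa using hx), pvTakeC]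
      by_cases h : c = 0
      · simp [h]
      · simp [h, ih]
    · rw [pvGoB, if_neg hx, List.filter_cons_of_neg (by simpa using hx), ih]

-- ===== VERDICT (by name: the statement is the Claim_ definition above) =====
theorem first_even_elements_spec : Claim_equal_first_even_elements := by
  intro array count _
  unfold Spec_first_even_elements first_even_elements first_even_elements_alt
  have := pvLoopA_range (array.filter (fun el => PySem.Int.mod el 2 = 0)) [] count
  simpa [pvGoB_eq_takeC] using this
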